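-- pv_equiv track=rewrite | github.com/diresi/adventofcode2019 | day3.py | mk_segments
-- ===== SOURCE A (Python) =====
-- def mk_segments(steps):
--     lines = []
--     last = (0, 0)
--     for step in steps:
--         x, y = last
--         d, v = step
--         if d == "R":
--             x += v
--         elif d == "L":
--             x -= v
--         elif d == "U":
--             y += v
--         elif d == "D":
--             y -= v
--         else:
--             raise Exception("invalid step: %r" % (step,))
--
--         lines.append((last, (x, y)))
--         last = (x, y)
--     return lines
-- ===== SOURCE B (Python) =====
-- def _delta(step):
--     d, v = step
--     if d == "R":
--         return (v, 0)
--     if d == "L":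
--         return (-v, 0)
--     if d == "U":
--         return (0, v)
--     if d == "D":
--         return (0, -v)
--     raise Exception("invalid step: %r" % (step,))
--
--
-- def _segs(steps):
--     # segments of the path described by `steps`, starting at the origin (0, 0)
--     n = len(steps)
--     if n == 0:
--         return []
--     if n == 1:
--         return [((0, 0), _delta(steps[0]))]
--     mid = n // 2
--     left = _segs(steps[:mid])
--     right = _segs(steps[mid:])
--     ox, oy = left[-1][1]
--     return left + [((x1 + ox, y1 + oy), (x2 + ox, y2 + oy))
--                    for ((x1, y1), (x2, y2)) in right]
--
--
-- def mk_segments(steps):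
--     return _segs(list(steps))
-- ===== Notes on version B (the rewrite author's own statement) =====
-- stated objective: alternative
-- what changed: B is divide-and-conquer: it recursively builds the segments of each half of the step list relative to the origin and translates the right half's segments by the left half's endpoint, instead of A's single left-to-right pass tracking the last point.
import Mathlib
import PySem

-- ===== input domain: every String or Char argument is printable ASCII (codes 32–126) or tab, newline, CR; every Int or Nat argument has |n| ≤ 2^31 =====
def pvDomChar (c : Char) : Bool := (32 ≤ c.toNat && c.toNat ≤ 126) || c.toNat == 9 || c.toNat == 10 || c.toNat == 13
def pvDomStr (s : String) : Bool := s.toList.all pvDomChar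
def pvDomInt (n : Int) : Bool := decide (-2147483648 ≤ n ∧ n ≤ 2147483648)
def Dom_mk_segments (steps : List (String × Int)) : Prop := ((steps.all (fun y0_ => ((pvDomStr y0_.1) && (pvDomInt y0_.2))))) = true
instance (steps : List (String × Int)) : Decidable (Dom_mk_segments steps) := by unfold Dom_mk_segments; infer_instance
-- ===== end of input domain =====

-- B is divide-and-conquer: segments of each half relative to the origin, right half translated
-- by the left half's endpoint — an alternative decomposition of the same exact computation.


-- ===== PORT A =====
-- A's loop: accumulate the segment list while tracking `last`; `none` = the Exception branch.
def mkSegLoopA : List (String × Int) → (Int × Int) → List ((Int × Int) × (Int × Int)) →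
    Option (List ((Int × Int) × (Int × Int)))
  | [], _, lines => some lines
  | (d, v) :: rest, last, lines =>
    if d = "R" then mkSegLoopA rest (last.1 + v, last.2) (lines ++ [(last, (last.1 + v, last.2))])
    else if d = "L" then mkSegLoopA rest (last.1 - v, last.2) (lines ++ [(last, (last.1 - v, last.2))])
    else if d = "U" then mkSegLoopA rest (last.1, last.2 + v) (lines ++ [(last, (last.1, last.2 + v))])
    else if d = "D" then mkSegLoopA rest (last.1, last.2 - v) (lines ++ [(last, (last.1, last.2 - v))])
    else none

def mk_segments (steps : List (String × Int)) : List ((Int × Int) × (Int × Int)) :=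
  (mkSegLoopA steps (0, 0) []).getD []

-- ===== PORT B =====
-- B's `_delta`: the unit displacement of one step; `none` = the Exception branch.
def deltaB (step : String × Int) : Option (Int × Int) :=
  if step.1 = "R" then some (step.2, 0)
  else if step.1 = "L" then some (-step.2, 0)
  else if step.1 = "U" then some (0, step.2)
  else if step.1 = "D" then some (0, -step.2)
  else none

-- the comprehension body: translate one segment by the offset o
def shiftB (o : Int × Int) (seg : (Int × Int) × (Int × Int)) : (Int × Int) × (Int × Int) :=
  ((seg.1.1 + o.1, seg.1.2 + o.2), (seg.2.1 + o.1, seg.2.2 + o.2))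

-- B's `_segs`: divide and conquer; the left half is nonempty (mid ≥ 1), so Python's
-- left[-1][1] is ported as getLastD (the default is never read).
def segsB : List (String × Int) → Option (List ((Int × Int) × (Int × Int)))
  | [] => some []
  | [s] => (deltaB s).map (fun d => [((0, 0), d)])
  | s1 :: s2 :: rest =>
    let steps := s1 :: s2 :: rest
    let mid := steps.length / 2
    match segsB (steps.take mid), segsB (steps.drop mid) with
    | some left, some right =>
      let o := (left.getLastD ((0, 0), (0, 0))).2
      some (left ++ right.map (shiftB o))
    | _, _ => none
  termination_by steps => steps.length
  decreasing_by
  · simp; omega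
  · simp; omega

def mk_segments_alt (steps : List (String × Int)) : List ((Int × Int) × (Int × Int)) :=
  (segsB steps).getD []

-- ===== PRECONDITION & SPEC =====
-- Pre_ excludes exactly the inputs on which A raises Exception("invalid step: ..."): a step whose
-- direction is not one of "R", "L", "U", "D". B raises the same exception there.
def Pre_mk_segments (steps : List (String × Int)) : Prop :=
  ∀ p ∈ steps, p.1 = "R" ∨ p.1 = "L" ∨ p.1 = "U" ∨ p.1 = "D"
instance (steps : List (String × Int)) : Decidable (Pre_mk_segments steps) := by
  unfold Pre_mk_segments; infer_instance

def pvWitness_mk_segments : (List (String × Int)) := [("R", 3), ("U", 2), ("L", 5)]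

def Spec_mk_segments (steps : List (String × Int)) (out : List ((Int × Int) × (Int × Int))) : Prop := out = mk_segments_alt steps
instance (steps : List (String × Int)) (out : List ((Int × Int) × (Int × Int))) : Decidable (Spec_mk_segments steps out) := by unfold Spec_mk_segments; infer_instance

-- ===== CLAIM (what is proved, stated in full; the proofs are below) =====
def Claim_equal_mk_segments : Prop := ∀ (steps : List (String × Int)), Dom_mk_segments steps → Pre_mk_segments steps → Spec_mk_segments steps (mk_segments steps)

-- ===== LEMMAS AND PROOFS =====

-- Proof-side reference function: the segment list of a valid path from `cur`.
def stepDelta (p : String × Int) : Int × Int :=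
  if p.1 = "R" then (p.2, 0) else if p.1 = "L" then (-p.2, 0)
  else if p.1 = "U" then (0, p.2) else (0, -p.2)

def ptAdd (a b : Int × Int) : Int × Int := (a.1 + b.1, a.2 + b.2)

def segF : List (String × Int) → (Int × Int) → List ((Int × Int) × (Int × Int))
  | [], _ => []
  | s :: rest, cur => (cur, ptAdd cur (stepDelta s)) :: segF rest (ptAdd cur (stepDelta s))

def endF : List (String × Int) → (Int × Int) → (Int × Int)
  | [], cur => cur
  | s :: rest, cur => endF rest (ptAdd cur (stepDelta s))

-- A's loop computes segF, threading the accumulator.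
theorem mkSegLoopA_eq (steps : List (String × Int)) (h : Pre_mk_segments steps) :
    ∀ (cur : Int × Int) (lines : List ((Int × Int) × (Int × Int))),
      mkSegLoopA steps cur lines = some (lines ++ segF steps cur) := by
  induction steps with
  | nil => intro cur lines; simp [mkSegLoopA, segF]
  | cons p rest ih =>
    obtain ⟨d, v⟩ := p
    have hd := h (d, v) (List.mem_cons_self ..)
    have hrest : Pre_mk_segments rest := fun q hq => h q (List.mem_cons_of_mem _ hq)
    intro cur lines
    rcases hd with hd | hd | hd | hd <;> subst hd <;>
      simp [mkSegLoopA, segF, stepDelta, ptAdd, ih hrest, Int.sub_eq_add_neg]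

theorem segF_append (l r : List (String × Int)) :
    ∀ cur, segF (l ++ r) cur = segF l cur ++ segF r (endF l cur) := by
  induction l with
  | nil => intro cur; simp [segF, endF]
  | cons s rest ih => intro cur; simp [segF, endF, ih]

theorem segF_shift (steps : List (String × Int)) :
    ∀ (a o : Int × Int), segF steps (ptAdd a o) = (segF steps a).map (shiftB o) := by
  induction steps with
  | nil => intro a o; simp [segF]
  | cons s rest ih =>
    intro a o
    have h1 : ptAdd (ptAdd a o) (stepDelta s) = ptAdd (ptAdd a (stepDelta s)) o := by
      simp [ptAdd]; constructor <;> ring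
    simp only [segF, List.map_cons]
    rw [h1, ih (ptAdd a (stepDelta s)) o]
    congr 1

theorem segF_getLast (l : List (String × Int)) (hne : l ≠ []) :
    ∀ (cur : Int × Int) (dflt : (Int × Int) × (Int × Int)),
      ((segF l cur).getLastD dflt).2 = endF l cur := by
  induction l with
  | nil => exact absurd rfl hne
  | cons s rest ih =>
    intro cur dflt
    cases rest with
    | nil => simp [segF, endF]
    | cons s2 r2 =>
      rw [show segF (s :: s2 :: r2) cur
            = (cur, ptAdd cur (stepDelta s)) :: segF (s2 :: r2) (ptAdd cur (stepDelta s)) from rfl,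
          List.getLastD_cons,
          show endF (s :: s2 :: r2) cur = endF (s2 :: r2) (ptAdd cur (stepDelta s)) from rfl]
      exact ih (by simp) _ _

theorem segsB_eq : ∀ (steps : List (String × Int)), Pre_mk_segments steps →
    segsB steps = some (segF steps (0, 0)) := by
  intro steps
  induction steps using segsB.induct with
  | case1 => intro _; simp [segsB, segF]
  | case2 s =>
    intro h
    have hd := h s (List.mem_cons_self ..)
    rcases hd with hd | hd | hd | hd <;>
      simp [segsB, deltaB, segF, stepDelta, ptAdd, hd]
  | case3 s1 s2 rest stps md left right hdrop htake ihtake ihdrop =>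
    intro h
    have hpre1 : Pre_mk_segments ((s1 :: s2 :: rest).take ((s1 :: s2 :: rest).length / 2)) :=
      fun q hq => h q (List.mem_of_mem_take hq)
    have hpre2 : Pre_mk_segments ((s1 :: s2 :: rest).drop ((s1 :: s2 :: rest).length / 2)) :=
      fun q hq => h q (List.mem_of_mem_drop hq)
    have htne : (s1 :: s2 :: rest).take ((s1 :: s2 :: rest).length / 2) ≠ [] := by
      intro hc
      have := congrArg List.length hc
      simp at this
    have hleft : left = segF ((s1 :: s2 :: rest).take ((s1 :: s2 :: rest).length / 2)) (0, 0) := by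
      have := ihtake hpre1
      rw [htake] at this
      exact Option.some.inj this
    have hright : right = segF ((s1 :: s2 :: rest).drop ((s1 :: s2 :: rest).length / 2)) (0, 0) := by
      have := ihdrop hpre2
      rw [hdrop] at this
      exact Option.some.inj this
    have htake' : segsB (List.take ((s1 :: s2 :: rest).length / 2) (s1 :: s2 :: rest)) = some left := htake
    have hdrop' : segsB (List.drop ((s1 :: s2 :: rest).length / 2) (s1 :: s2 :: rest)) = some right := hdrop
    unfold segsB
    show (match segsB (List.take ((s1 :: s2 :: rest).length / 2) (s1 :: s2 :: rest)),
            segsB (List.drop ((s1 :: s2 :: rest).length / 2) (s1 :: s2 :: rest)) with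
          | some left, some right => some (left ++ List.map (shiftB ((left.getLastD ((0, 0), (0, 0))).2)) right)
          | _, _ => none)
          = some (segF (s1 :: s2 :: rest) (0, 0))
    rw [htake', hdrop']
    show some (left ++ List.map (shiftB ((left.getLastD ((0, 0), (0, 0))).2)) right)
        = some (segF (s1 :: s2 :: rest) (0, 0))
    rw [hleft, hright, segF_getLast _ htne]
    have hp : ptAdd (0, 0) (endF ((s1 :: s2 :: rest).take ((s1 :: s2 :: rest).length / 2)) (0, 0))
        = endF ((s1 :: s2 :: rest).take ((s1 :: s2 :: rest).length / 2)) (0, 0) := by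
      simp [ptAdd]
    rw [← segF_shift, hp, ← segF_append, List.take_append_drop]
  | case4 s1 s2 rest stps md hfail ihtake ihdrop =>
    intro h
    have hpre1 : Pre_mk_segments ((s1 :: s2 :: rest).take ((s1 :: s2 :: rest).length / 2)) :=
      fun q hq => h q (List.mem_of_mem_take hq)
    have hpre2 : Pre_mk_segments ((s1 :: s2 :: rest).drop ((s1 :: s2 :: rest).length / 2)) :=
      fun q hq => h q (List.mem_of_mem_drop hq)
    exact absurd (hfail _ _ (ihtake hpre1) (ihdrop hpre2)) (by simp)

-- ===== VERDICT (by name: the statement is the Claim_ definition above) =====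
theorem mk_segments_spec : Claim_equal_mk_segments := by
  intro steps _ hpre
  unfold Spec_mk_segments mk_segments mk_segments_alt
  rw [mkSegLoopA_eq steps hpre, segsB_eq steps hpre]
  simp
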